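-- pv_equiv track=rewrite | github.com/Shadowedvaca/PullAllTheThings-site | src/sv_common/guild_sync/source_config.py | get_track_label
-- ===== SOURCE A (Python) =====
-- TRACKS_BY_TYPE: dict[str, list[str]] = {
--     "raid":       ["V", "C", "H", "M"],
--     "world_boss": ["C", "H", "M"],   # No RF tier for outdoor world bosses
--     "dungeon":    ["C", "H", "M"],
-- }
--
-- def get_tracks(instance_type: str) -> list[str]:
--     """Return quality tracks for a given instance type."""
--     return TRACKS_BY_TYPE.get(instance_type, ["C", "H", "M"])
--
-- def get_track_label(instance_type: str) -> str:
--     """Return the minimum-difficulty display label for an instance type.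
--
--     Raid:       V→RF+  C→N+  H→H+  M→M    (shows lowest available)
--     World boss: C→N+   (no RF tier)
--     Dungeon:    C→0+   H→4+  M→10+
--     """
--     tracks = get_tracks(instance_type)
--     if not tracks:
--         return ""
--     min_track = next((t for t in ("V", "C", "H", "M") if t in tracks), None)
--     if not min_track:
--         return ""
--     return track_to_label(min_track, instance_type)
--
-- def track_to_label(track: str, instance_type: str) -> str:
--     """Convert a specific track letter to its display label for the given instance type.
--
--     Used when the label must reflect the player's actual upgrade need rather than
--     the lowest track the instance offers.
--     Raid/world boss: V→RF+  C→N+  H→H+  M→M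
--     Dungeon:         C→0+   H→4+  M→10+
--     """
--     if instance_type == "dungeon":
--         return {"C": "0+", "H": "4+", "M": "10+"}.get(track, "")
--     return {"V": "RF+", "C": "N+", "H": "H+", "M": "M"}.get(track, "")
-- ===== SOURCE B (Python) =====
-- _MIN_LABEL = {"raid": "RF+", "world_boss": "N+", "dungeon": "0+"}
--
-- def get_track_label(instance_type: str) -> str:
--     """Minimum-difficulty label, computed directly: raid's lowest track V -> RF+,
--     dungeon's lowest C -> 0+, anything else (world_boss or unknown) lowest C -> N+."""
--     return _MIN_LABEL.get(instance_type, "N+")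
-- ===== Notes on version B (the rewrite author's own statement) =====
-- stated objective: simpler
-- what changed: Replaced the track-list lookup, min-track scan over (V,C,H,M) and the per-type letter-to-label dictionaries with one precomputed closed-form table mapping instance_type directly to its minimum label, defaulting to N+.
import Mathlib
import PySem

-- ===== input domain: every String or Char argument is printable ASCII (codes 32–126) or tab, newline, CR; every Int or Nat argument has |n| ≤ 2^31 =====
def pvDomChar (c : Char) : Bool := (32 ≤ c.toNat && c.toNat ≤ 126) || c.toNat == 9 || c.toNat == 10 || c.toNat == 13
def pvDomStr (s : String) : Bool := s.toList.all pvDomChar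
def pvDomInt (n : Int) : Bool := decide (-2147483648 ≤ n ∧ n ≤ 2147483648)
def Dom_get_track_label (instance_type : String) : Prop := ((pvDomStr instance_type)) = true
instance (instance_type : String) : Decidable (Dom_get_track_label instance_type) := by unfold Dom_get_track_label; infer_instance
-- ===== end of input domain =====

-- B replaces A's track-list lookup + min-track scan + per-type label dicts with one
-- direct instance_type -> minimum-label table (objective: simpler).

-- ===== PORT A =====
def TRACKS_BY_TYPE : PySem.Dict String (List String) :=
  PySem.Dict.ofList [("raid", ["V", "C", "H", "M"]),
                     ("world_boss", ["C", "H", "M"]),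
                     ("dungeon", ["C", "H", "M"])]

def get_tracks (instance_type : String) : List String :=
  PySem.Dict.getD TRACKS_BY_TYPE instance_type ["C", "H", "M"]

def track_to_label (track : String) (instance_type : String) : String :=
  if instance_type == "dungeon" then
    PySem.Dict.getD (PySem.Dict.ofList [("C", "0+"), ("H", "4+"), ("M", "10+")]) track ""
  else
    PySem.Dict.getD (PySem.Dict.ofList [("V", "RF+"), ("C", "N+"), ("H", "H+"), ("M", "M")]) track ""

def get_track_label (instance_type : String) : String :=
  let tracks := get_tracks instance_type
  if tracks.isEmpty then ""
  else
    match (["V", "C", "H", "M"].find? (fun t => tracks.contains t)) with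
    | none => ""
    | some min_track => track_to_label min_track instance_type

-- ===== PORT B =====
def MIN_LABEL : PySem.Dict String String :=
  PySem.Dict.ofList [("raid", "RF+"), ("world_boss", "N+"), ("dungeon", "0+")]

def get_track_label_alt (instance_type : String) : String :=
  PySem.Dict.getD MIN_LABEL instance_type "N+"

-- ===== PRECONDITION & SPEC =====
def Spec_get_track_label (instance_type : String) (out : String) : Prop := out = get_track_label_alt instance_type
instance (instance_type : String) (out : String) : Decidable (Spec_get_track_label instance_type out) := by unfold Spec_get_track_label; infer_instance

-- ===== CLAIM (what is proved, stated in full; the proofs are below) =====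
def Claim_equal_get_track_label : Prop := ∀ (instance_type : String), Dom_get_track_label instance_type → Spec_get_track_label instance_type (get_track_label instance_type)

-- ===== LEMMAS AND PROOFS =====

-- ===== VERDICT (by name: the statement is the Claim_ definition above) =====
theorem get_track_label_spec : Claim_equal_get_track_label := by
  intro s _
  unfold Spec_get_track_label get_track_label get_track_label_alt get_tracks track_to_label
    TRACKS_BY_TYPE MIN_LABEL
  by_cases h1 : s = "raid"
  · subst h1; decide
  by_cases h2 : s = "world_boss"
  · subst h2; decide
  by_cases h3 : s = "dungeon"
  · subst h3; decide
  have b1 : ("raid" == s) = false := beq_eq_false_iff_ne.mpr (Ne.symm h1)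
  have b2 : ("world_boss" == s) = false := beq_eq_false_iff_ne.mpr (Ne.symm h2)
  have b3 : ("dungeon" == s) = false := beq_eq_false_iff_ne.mpr (Ne.symm h3)
  simp [PySem.Dict.getD, PySem.Dict.ofList, PySem.Dict.get?, PySem.Dict.empty, PySem.Dict.update,
    PySem.Dict.insert, List.find?, b1, b2, b3, h3]
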